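-- pv_equiv track=rewrite | github.com/auntduda/EFC-package | feature_extraction.py | length_continuous_string
-- ===== SOURCE A (Python) =====
-- def length_continuous_string(fqdn):
--     max_continous_str, strs = 0, 0
--     for c in fqdn:
--         if c.isalpha():
--             strs += 1
--             if strs > max_continous_str:
--                max_continous_str = strs
--         else:
--             strs = 0
--     return max_continous_str
-- ===== SOURCE B (Python) =====
-- def length_continuous_string(fqdn):
--     # two-pointer run scan: jump over each maximal alphabetic run at once
--     best = 0
--     i, n = 0, len(fqdn)
--     while i < n:
--         if fqdn[i].isalpha():
--             j = i
--             while j < n and fqdn[j].isalpha():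
--                 j += 1
--             if j - i > best:
--                 best = j - i
--             i = j
--         else:
--             i += 1
--     return best
-- ===== Notes on version B (the rewrite author's own statement) =====
-- stated objective: alternative
-- what changed: Replaces the per-character running counter with running max by a two-pointer scan that jumps over each maximal alphabetic run and takes the max of run lengths.
import Mathlib
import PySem

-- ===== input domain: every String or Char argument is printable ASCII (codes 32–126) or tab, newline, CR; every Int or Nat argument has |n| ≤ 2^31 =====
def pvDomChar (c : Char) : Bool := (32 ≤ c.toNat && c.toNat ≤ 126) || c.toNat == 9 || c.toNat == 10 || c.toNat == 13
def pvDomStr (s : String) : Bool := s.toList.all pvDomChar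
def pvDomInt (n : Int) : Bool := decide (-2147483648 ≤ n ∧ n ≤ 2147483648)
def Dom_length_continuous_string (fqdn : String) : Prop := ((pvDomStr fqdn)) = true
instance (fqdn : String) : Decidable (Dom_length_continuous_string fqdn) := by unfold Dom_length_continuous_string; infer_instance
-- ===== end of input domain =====

-- B replaces A's per-character counter/max by a two-pointer scan that jumps over each
-- maximal alphabetic run and keeps the max of run lengths (objective: alternative).

-- ===== PORT A =====
-- one loop iteration of A: state (max_continous_str, strs)
def pvStepA (p : Int × Int) (c : Char) : Int × Int :=
  if PySem.Chars.isalpha c then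
    let strs := p.2 + 1
    (if strs > p.1 then strs else p.1, strs)
  else (p.1, 0)

def length_continuous_string (fqdn : String) : Int :=
  (fqdn.toList.foldl pvStepA (0, 0)).1

-- ===== PORT B =====
-- B's outer while-loop: `best` is the accumulator; an alphabetic position advances the
-- inner pointer over the whole run (takeWhile/dropWhile = the inner `while j < n and isalpha`)
def pvRunGo (best : Int) : List Char → Int
  | [] => best
  | c :: cs =>
    if PySem.Chars.isalpha c then
      let run : Int := (((c :: cs).takeWhile PySem.Chars.isalpha).length : Int)
      pvRunGo (if run > best then run else best) (cs.dropWhile PySem.Chars.isalpha)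
    else pvRunGo best cs
termination_by l => l.length
decreasing_by
  · exact Nat.lt_succ_of_le (List.length_dropWhile_le _ _)
  · exact Nat.lt_succ_of_le (Nat.le_refl _)

def length_continuous_string_alt (fqdn : String) : Int :=
  pvRunGo 0 fqdn.toList

-- ===== PRECONDITION & SPEC =====
def Spec_length_continuous_string (fqdn : String) (out : Int) : Prop := out = length_continuous_string_alt fqdn
instance (fqdn : String) (out : Int) : Decidable (Spec_length_continuous_string fqdn out) := by unfold Spec_length_continuous_string; infer_instance

-- ===== CLAIM (what is proved, stated in full; the proofs are below) =====
def Claim_equal_length_continuous_string : Prop := ∀ (fqdn : String), Dom_length_continuous_string fqdn → Spec_length_continuous_string fqdn (length_continuous_string fqdn)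

-- ===== LEMMAS AND PROOFS =====

-- the max run value ever reached when the current run already has length s
def pvG (s : Int) : List Char → Int
  | [] => 0
  | c :: cs => if PySem.Chars.isalpha c then max (s + 1) (pvG (s + 1) cs) else pvG 0 cs

theorem pvFoldA (cs : List Char) : ∀ (m s : Int), 0 ≤ m → 0 ≤ s →
    (cs.foldl pvStepA (m, s)).1 = max m (pvG s cs) := by
  induction cs with
  | nil => intro m s hm _; simp [pvG]; omega
  | cons c cs ih =>
    intro m s hm hs
    by_cases h : PySem.Chars.isalpha c = true
    · simp only [List.foldl_cons, pvStepA, pvG, h, if_true]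
      rw [ih _ _ (by split_ifs <;> omega) (by omega)]
      split_ifs <;> omega
    · simp [List.foldl_cons, pvStepA, pvG, h]
      rw [ih _ _ hm (by omega)]

theorem pvG_alpha_cons (cs : List Char) : ∀ (s : Int) (c : Char),
    PySem.Chars.isalpha c = true →
    pvG s (c :: cs) = max (s + 1 + ((cs.takeWhile PySem.Chars.isalpha).length : Int))
      (pvG 0 (cs.dropWhile PySem.Chars.isalpha)) := by
  induction cs with
  | nil => intro s c hc; simp [pvG, hc]
  | cons d ds ih =>
    intro s c hc
    by_cases hd : PySem.Chars.isalpha d = true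
    · have h1 : pvG s (c :: d :: ds) = max (s + 1) (pvG (s + 1) (d :: ds)) := by
        simp [pvG, hc]
      rw [h1, ih (s + 1) d hd]
      simp [hd]
      omega
    · have h1 : pvG s (c :: d :: ds) = max (s + 1) (pvG (s + 1) (d :: ds)) := by
        simp [pvG, hc]
      have h2 : pvG (s + 1) (d :: ds) = pvG 0 ds := by simp [pvG, hd]
      have h3 : pvG 0 (d :: ds) = pvG 0 ds := by simp [pvG, hd]
      rw [h1, h2, List.takeWhile_cons, List.dropWhile_cons]
      simp [hd, h3]

theorem pvRunGo_eq (n : ℕ) : ∀ (cs : List Char) (best : Int), cs.length ≤ n → 0 ≤ best →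
    pvRunGo best cs = max best (pvG 0 cs) := by
  induction n with
  | zero =>
    intro cs best hlen hb
    have : cs = [] := List.eq_nil_of_length_eq_zero (Nat.le_zero.mp hlen)
    subst this; simp [pvRunGo, pvG]; omega
  | succ n ih =>
    intro cs best hlen hb
    match cs with
    | [] => simp [pvRunGo, pvG]; omega
    | c :: cs =>
      by_cases h : PySem.Chars.isalpha c = true
      · rw [pvRunGo, if_pos h]
        have hlen' : (cs.dropWhile PySem.Chars.isalpha).length ≤ n :=
          le_trans (List.length_dropWhile_le _ _) (Nat.lt_succ_iff.mp (Nat.lt_of_lt_of_le (Nat.lt_succ_of_le (Nat.le_refl _)) hlen))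
        rw [ih _ _ hlen' (by omega)]
        rw [pvG_alpha_cons cs 0 c h]
        simp [List.takeWhile_cons_of_pos h]
        omega
      · rw [pvRunGo, if_neg h]
        have : pvG 0 (c :: cs) = pvG 0 cs := by simp [pvG, h]
        rw [ih cs best (by simpa using Nat.lt_succ_iff.mp (Nat.lt_of_lt_of_le (Nat.lt_succ_of_le (Nat.le_refl _)) hlen)) hb, this]

-- ===== VERDICT (by name: the statement is the Claim_ definition above) =====
theorem length_continuous_string_spec : Claim_equal_length_continuous_string := by
  intro fqdn _
  unfold Spec_length_continuous_string length_continuous_string length_continuous_string_alt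
  rw [pvFoldA fqdn.toList 0 0 le_rfl le_rfl, pvRunGo_eq fqdn.toList.length fqdn.toList 0 (Nat.le_refl _) (by omega)]
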